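-- pv_equiv track=rewrite | github.com/yarmash/codejam | 2016/1A/bffs.py | get_chain_len
-- ===== SOURCE A (Python) =====
-- def get_chain_len(cycle, bff_to_ids):
--     """Find the longest chain that can be formed from a 2-cycle component."""
--     chain_len = 2
--
--     for kid in cycle:
--         max_subchain_len = 0
--         stack = [(kid, 0)]
--
--         while stack:
--             last_kid, subchain_len = stack.pop()
--             if subchain_len > max_subchain_len:
--                 max_subchain_len = subchain_len
--
--             for kid_id in bff_to_ids[last_kid]:
--                 if kid_id not in cycle:
--                     stack.append((kid_id, subchain_len + 1))
--
--         chain_len += max_subchain_len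
--
--     return chain_len
-- ===== SOURCE B (Python) =====
-- def get_chain_len(cycle, bff_to_ids):
--     """Find the longest chain that can be formed from a 2-cycle component."""
--     total = 2
--     for kid in cycle:
--         depth = 0
--         level = [kid]
--         while True:
--             next_level = [c for n in level for c in bff_to_ids[n] if c not in cycle]
--             if not next_level:
--                 break
--             level = next_level
--             depth += 1
--         total += depth
--     return total
-- ===== Notes on version B (the rewrite author's own statement) =====
-- stated objective: alternative
-- what changed: A runs a DFS with an explicit (node, chain-length) stack and a running maximum per cycle kid; B instead measures the depth of each kid's feeder tree by breadth-first level expansion (repeatedly replacing the current level by all non-cycle children and counting how many times the level stays nonempty), so no per-path lengths or running max are kept.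
import Mathlib
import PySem

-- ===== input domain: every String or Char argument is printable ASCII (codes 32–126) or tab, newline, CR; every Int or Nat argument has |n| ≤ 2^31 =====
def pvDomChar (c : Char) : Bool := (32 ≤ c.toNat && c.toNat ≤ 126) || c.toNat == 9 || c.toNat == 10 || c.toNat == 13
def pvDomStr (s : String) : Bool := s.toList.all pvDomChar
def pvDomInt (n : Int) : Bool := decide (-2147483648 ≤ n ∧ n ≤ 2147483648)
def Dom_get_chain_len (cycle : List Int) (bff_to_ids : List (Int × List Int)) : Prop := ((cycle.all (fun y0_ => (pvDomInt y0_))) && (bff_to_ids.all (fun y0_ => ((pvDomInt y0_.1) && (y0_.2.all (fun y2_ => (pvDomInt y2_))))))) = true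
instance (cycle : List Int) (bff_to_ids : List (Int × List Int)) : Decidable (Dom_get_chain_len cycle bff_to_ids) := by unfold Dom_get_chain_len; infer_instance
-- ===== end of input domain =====

-- B replaces A's explicit-stack DFS (running max over per-path lengths) by breadth-first level
-- expansion counting the number of nonempty levels; objective: alternative (same cost class).

-- ===== PORT A =====
-- Python A's while-loop over an explicit stack.  `bff_to_ids[last_kid]` is ported as
-- `(List.lookup lk bff_to_ids).getD []` (KeyError = none, excluded by Pre_); the Nat fuel is only
-- a totality guard: Pre_ (reachable part of the graph acyclic) makes it large enough (proved below).
def pvLoopA (cycle : List Int) (bff_to_ids : List (Int × List Int)) :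
    Nat → List (Int × Int) → Int → Int
  | 0, _, max_subchain_len => max_subchain_len
  | _ + 1, [], max_subchain_len => max_subchain_len
  | f + 1, (last_kid, subchain_len) :: stack, max_subchain_len =>
      let m := if subchain_len > max_subchain_len then subchain_len else max_subchain_len
      let stack' := ((List.lookup last_kid bff_to_ids).getD []).foldl
        (fun s kid_id => if cycle.contains kid_id then s else (kid_id, subchain_len + 1) :: s) stack
      pvLoopA cycle bff_to_ids f stack' m

def get_chain_len (cycle : List Int) (bff_to_ids : List (Int × List Int)) : Int :=
  let fuel := ((bff_to_ids.map (fun p => p.2.length)).sum + 2) ^ (bff_to_ids.length + 1)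
  cycle.foldl
    (fun chain_len kid => chain_len + pvLoopA cycle bff_to_ids fuel [(kid, 0)] 0) 2

-- ===== PORT B =====
-- Python B's inner while-loop: replace the level by all non-cycle children, count nonempty levels.
-- Fuel (list length + 1) is only a totality guard; Pre_ makes it large enough (proved below).
def pvLevelLoop (cycle : List Int) (bff_to_ids : List (Int × List Int)) :
    Nat → List Int → Int → Int
  | 0, _, depth => depth
  | f + 1, level, depth =>
      let next_level := level.flatMap
        (fun n => ((List.lookup n bff_to_ids).getD []).filter (fun c => !cycle.contains c))
      if next_level.isEmpty then depth
      else pvLevelLoop cycle bff_to_ids f next_level (depth + 1)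

def get_chain_len_alt (cycle : List Int) (bff_to_ids : List (Int × List Int)) : Int :=
  cycle.foldl
    (fun total kid => total + pvLevelLoop cycle bff_to_ids (bff_to_ids.length + 1) [kid] 0) 2

-- ===== PRECONDITION & SPEC =====
-- The non-cycle children of a node, as both Pythons compute them.
def pvCNC (cycle : List Int) (bff_to_ids : List (Int × List Int)) (n : Int) : List Int :=
  ((List.lookup n bff_to_ids).getD []).filter (fun c => !cycle.contains c)

-- Nodes reachable from the cycle in exactly i steps while avoiding the cycle (deduplicated).
def pvFrontier (cycle : List Int) (bff_to_ids : List (Int × List Int)) : Nat → List Int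
  | 0 => cycle
  | i + 1 => ((pvFrontier cycle bff_to_ids i).flatMap (pvCNC cycle bff_to_ids)).dedup

-- Pre_ = exactly the inputs on which Python A returns: every node reachable from the cycle is a
-- key of bff_to_ids (else A raises KeyError) and the reachable part of the graph outside the
-- cycle is acyclic (else A's stack never empties and A diverges); reachable-and-acyclic is
-- expressed as "the (length+1)-st frontier is empty" (a simple path visits distinct keys).
def Pre_get_chain_len (cycle : List Int) (bff_to_ids : List (Int × List Int)) : Prop :=
  (∀ i ≤ bff_to_ids.length, ∀ n ∈ pvFrontier cycle bff_to_ids i,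
      (List.lookup n bff_to_ids).isSome = true) ∧
  pvFrontier cycle bff_to_ids (bff_to_ids.length + 1) = []

instance (cycle : List Int) (bff_to_ids : List (Int × List Int)) :
    Decidable (Pre_get_chain_len cycle bff_to_ids) := by
  unfold Pre_get_chain_len; infer_instance

def pvWitness_get_chain_len : List Int × (List (Int × List Int)) :=
  ([0, 1], [(0, [1, 2]), (1, []), (2, [])])

def Spec_get_chain_len (cycle : List Int) (bff_to_ids : List (Int × List Int)) (out : Int) : Prop := out = get_chain_len_alt cycle bff_to_ids
instance (cycle : List Int) (bff_to_ids : List (Int × List Int)) (out : Int) : Decidable (Spec_get_chain_len cycle bff_to_ids out) := by unfold Spec_get_chain_len; infer_instance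

-- ===== CLAIM (what is proved, stated in full; the proofs are below) =====
def Claim_equal_get_chain_len : Prop := ∀ (cycle : List Int) (bff_to_ids : List (Int × List Int)), Dom_get_chain_len cycle bff_to_ids → Pre_get_chain_len cycle bff_to_ids → Spec_get_chain_len cycle bff_to_ids (get_chain_len cycle bff_to_ids)

-- ===== LEMMAS AND PROOFS =====

-- ---- generic fold-of-max helpers (g-shaped folds both programs reduce to) ----
theorem pvFoldMax_init {α : Type} (g : α → Int) (l : List α) (i j : Int) :
    l.foldl (fun a x => max a (g x)) (max i j) = max i (l.foldl (fun a x => max a (g x)) j) := by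
  induction l generalizing j with
  | nil => rfl
  | cons x l ih =>
      simp only [List.foldl_cons]
      rw [show max (max i j) (g x) = max i (max j (g x)) by omega, ih]

theorem pvFoldMax_ge_init {α : Type} (g : α → Int) (l : List α) (i : Int) :
    i ≤ l.foldl (fun a x => max a (g x)) i := by
  induction l generalizing i with
  | nil => simp
  | cons x l ih => exact le_trans (le_max_left _ _) (ih _)

theorem pvFoldMax_le {α : Type} (g : α → Int) (l : List α) :
    ∀ (i B : Int), (∀ x ∈ l, g x ≤ B) → i ≤ B →
    l.foldl (fun a x => max a (g x)) i ≤ B := by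
  induction l with
  | nil => intro i B _ hi; simpa
  | cons x l ih =>
      intro i B hB hi
      simp only [List.foldl_cons]
      exact ih _ _ (fun y hy => hB y (List.mem_cons_of_mem _ hy))
        (by have := hB x (List.mem_cons_self ..); omega)

theorem pvFoldMax_ge_mem {α : Type} (g : α → Int) (l : List α) :
    ∀ (i : Int) (x : α), x ∈ l → g x ≤ l.foldl (fun a x => max a (g x)) i := by
  induction l with
  | nil => intro i x hx; cases hx
  | cons y l ih =>
      intro i x hx
      rcases List.mem_cons.mp hx with rfl | hx
      · exact le_trans (le_max_right _ _) (pvFoldMax_ge_init _ _ _)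
      · exact ih _ _ hx

theorem pvFoldMax_add {α : Type} (g : α → Int) (l : List α) (s i : Int) :
    s + l.foldl (fun a x => max a (g x)) i = l.foldl (fun a x => max a (s + g x)) (s + i) := by
  induction l generalizing i with
  | nil => rfl
  | cons x l ih =>
      simp only [List.foldl_cons]
      rw [ih, show max (s + i) (s + g x) = s + max i (g x) by omega]

-- A's push loop builds (filtered children, mapped, reversed) on top of the old stack.
theorem pvFoldPush {α β : Type} (p : α → Bool) (h : α → β) (l : List α) (rest : List β) :
    l.foldl (fun s c => if p c then s else h c :: s) rest
      = ((l.filter (fun c => !p c)).map h).reverse ++ rest := by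
  induction l generalizing rest with
  | nil => rfl
  | cons x l ih =>
      simp only [List.foldl_cons, List.filter_cons]
      cases hp : p x <;> simp [ih]

-- ---- frontier / reachability ----
theorem pvFrontier_succ_nil (cycle : List Int) (bff_to_ids : List (Int × List Int)) (i : Nat)
    (h : pvFrontier cycle bff_to_ids i = []) : pvFrontier cycle bff_to_ids (i + 1) = [] := by
  simp [pvFrontier, h]

theorem pvFrontier_nil_of_ge (cycle : List Int) (bff_to_ids : List (Int × List Int))
    (hE : pvFrontier cycle bff_to_ids (bff_to_ids.length + 1) = []) :
    ∀ j, bff_to_ids.length + 1 ≤ j → pvFrontier cycle bff_to_ids j = [] := by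
  intro j hj
  induction j with
  | zero => omega
  | succ j ih =>
      rcases Nat.lt_or_ge (bff_to_ids.length + 1) (j + 1) with h | h
      · exact pvFrontier_succ_nil _ _ _ (ih (by omega))
      · have : j + 1 = bff_to_ids.length + 1 := by omega
        rw [this]; exact hE

theorem pvFrontier_child {cycle : List Int} {bff_to_ids : List (Int × List Int)} {i : Nat}
    {n c : Int} (hn : n ∈ pvFrontier cycle bff_to_ids i) (hc : c ∈ pvCNC cycle bff_to_ids n) :
    c ∈ pvFrontier cycle bff_to_ids (i + 1) := by
  simp only [pvFrontier, List.mem_dedup, List.mem_flatMap]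
  exact ⟨n, hn, hc⟩

def pvReach (cycle : List Int) (bff_to_ids : List (Int × List Int)) (n : Int) : Prop :=
  ∃ i ≤ bff_to_ids.length, n ∈ pvFrontier cycle bff_to_ids i

-- the LAST index at which n occurs in a frontier
def pvMx (cycle : List Int) (bff_to_ids : List (Int × List Int)) (n : Int) : Nat :=
  Nat.findGreatest (fun i => n ∈ pvFrontier cycle bff_to_ids i) bff_to_ids.length

-- rank: strictly decreases from a node to its non-cycle children; ≥ 1 on reachable nodes
def pvRk (cycle : List Int) (bff_to_ids : List (Int × List Int)) (n : Int) : Nat :=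
  bff_to_ids.length + 1 - pvMx cycle bff_to_ids n

theorem pvMx_mem {cycle : List Int} {bff_to_ids : List (Int × List Int)} {n : Int}
    (hn : pvReach cycle bff_to_ids n) :
    n ∈ pvFrontier cycle bff_to_ids (pvMx cycle bff_to_ids n) := by
  obtain ⟨i, hi, hmem⟩ := hn
  exact Nat.findGreatest_spec (P := fun j => n ∈ pvFrontier cycle bff_to_ids j) hi hmem

theorem pvRk_pos {cycle : List Int} {bff_to_ids : List (Int × List Int)} {n : Int} :
    1 ≤ pvRk cycle bff_to_ids n := by
  have := Nat.findGreatest_le (P := fun i => n ∈ pvFrontier cycle bff_to_ids i)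
    bff_to_ids.length
  unfold pvRk pvMx; omega

theorem pvRk_le {cycle : List Int} {bff_to_ids : List (Int × List Int)} {n : Int} :
    pvRk cycle bff_to_ids n ≤ bff_to_ids.length + 1 := by
  unfold pvRk; omega

theorem pvChild_reach {cycle : List Int} {bff_to_ids : List (Int × List Int)} {n c : Int}
    (hE : pvFrontier cycle bff_to_ids (bff_to_ids.length + 1) = [])
    (hn : pvReach cycle bff_to_ids n) (hc : c ∈ pvCNC cycle bff_to_ids n) :
    pvReach cycle bff_to_ids c ∧ pvRk cycle bff_to_ids c < pvRk cycle bff_to_ids n := by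
  have hcm : c ∈ pvFrontier cycle bff_to_ids (pvMx cycle bff_to_ids n + 1) :=
    pvFrontier_child (pvMx_mem hn) hc
  have hlt : pvMx cycle bff_to_ids n + 1 ≤ bff_to_ids.length := by
    by_contra h
    rw [pvFrontier_nil_of_ge _ _ hE _ (by omega)] at hcm
    cases hcm
  have hreach : pvReach cycle bff_to_ids c := ⟨_, hlt, hcm⟩
  have hge : pvMx cycle bff_to_ids n + 1 ≤ pvMx cycle bff_to_ids c :=
    Nat.le_findGreatest hlt hcm
  have hle := Nat.findGreatest_le (P := fun i => c ∈ pvFrontier cycle bff_to_ids i)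
    bff_to_ids.length
  exact ⟨hreach, by unfold pvRk; omega⟩

-- ---- the common specification value: truncated depth, stable at fuel = rank ----
def pvDval (cycle : List Int) (bff_to_ids : List (Int × List Int)) : Nat → Int → Int
  | 0, _ => 0
  | f + 1, n => (pvCNC cycle bff_to_ids n).foldl
      (fun a c => max a (1 + pvDval cycle bff_to_ids f c)) 0

def pvTd (cycle : List Int) (bff_to_ids : List (Int × List Int)) (n : Int) : Int :=
  pvDval cycle bff_to_ids (pvRk cycle bff_to_ids n) n

theorem pvDval_nonneg (cycle : List Int) (bff_to_ids : List (Int × List Int)) (f : Nat)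
    (n : Int) : 0 ≤ pvDval cycle bff_to_ids f n := by
  cases f with
  | zero => simp [pvDval]
  | succ f => exact pvFoldMax_ge_init _ _ _

theorem pvTd_nonneg (cycle : List Int) (bff_to_ids : List (Int × List Int)) (n : Int) :
    0 ≤ pvTd cycle bff_to_ids n := pvDval_nonneg _ _ _ _

theorem pvDval_stable {cycle : List Int} {bff_to_ids : List (Int × List Int)}
    (hE : pvFrontier cycle bff_to_ids (bff_to_ids.length + 1) = []) :
    ∀ r n f g, pvReach cycle bff_to_ids n → pvRk cycle bff_to_ids n ≤ r →
      pvRk cycle bff_to_ids n ≤ f → pvRk cycle bff_to_ids n ≤ g →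
      pvDval cycle bff_to_ids f n = pvDval cycle bff_to_ids g n := by
  intro r
  induction r with
  | zero => intro n f g _ hr _ _; have := pvRk_pos (cycle := cycle) (bff_to_ids := bff_to_ids) (n := n); omega
  | succ r ih =>
      intro n f g hn hr hf hg
      have h1 : 1 ≤ pvRk cycle bff_to_ids n := pvRk_pos
      obtain ⟨f', rfl⟩ : ∃ f', f = f' + 1 := ⟨f - 1, by omega⟩
      obtain ⟨g', rfl⟩ : ∃ g', g = g' + 1 := ⟨g - 1, by omega⟩
      simp only [pvDval]
      apply PySem.List.foldl_congr_mem
      intro acc c hc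
      obtain ⟨hrc, hlt⟩ := pvChild_reach hE hn hc
      rw [ih c f' (pvRk cycle bff_to_ids c) hrc (by omega) (by omega) (by omega),
          ih c g' (pvRk cycle bff_to_ids c) hrc (by omega) (by omega) (by omega)]

theorem pvTd_unfold {cycle : List Int} {bff_to_ids : List (Int × List Int)}
    (hE : pvFrontier cycle bff_to_ids (bff_to_ids.length + 1) = []) {n : Int}
    (hn : pvReach cycle bff_to_ids n) :
    pvTd cycle bff_to_ids n = (pvCNC cycle bff_to_ids n).foldl
      (fun a c => max a (1 + pvTd cycle bff_to_ids c)) 0 := by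
  have h1 : 1 ≤ pvRk cycle bff_to_ids n := pvRk_pos
  obtain ⟨r, hr⟩ : ∃ r, pvRk cycle bff_to_ids n = r + 1 := ⟨pvRk cycle bff_to_ids n - 1, by omega⟩
  unfold pvTd
  rw [hr]
  simp only [pvDval]
  apply PySem.List.foldl_congr_mem
  intro acc c hc
  obtain ⟨hrc, hlt⟩ := pvChild_reach hE hn hc
  rw [pvDval_stable hE (pvRk cycle bff_to_ids c) c r (pvRk cycle bff_to_ids c) hrc
    le_rfl (by omega) le_rfl]

theorem pvTd_le_rk {cycle : List Int} {bff_to_ids : List (Int × List Int)}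
    (hE : pvFrontier cycle bff_to_ids (bff_to_ids.length + 1) = []) :
    ∀ r n, pvReach cycle bff_to_ids n → pvRk cycle bff_to_ids n ≤ r →
      pvTd cycle bff_to_ids n ≤ (pvRk cycle bff_to_ids n : Int) - 1 := by
  intro r
  induction r with
  | zero => intro n _ hr; have := pvRk_pos (cycle := cycle) (bff_to_ids := bff_to_ids) (n := n); omega
  | succ r ih =>
      intro n hn hr
      have h1 : 1 ≤ pvRk cycle bff_to_ids n := pvRk_pos
      rw [pvTd_unfold hE hn]
      apply pvFoldMax_le
      · intro c hc
        obtain ⟨hrc, hlt⟩ := pvChild_reach hE hn hc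
        have := ih c hrc (by omega)
        omega
      · omega

-- ---- A-side: stack invariant ----
def pvSM (cycle : List Int) (bff_to_ids : List (Int × List Int)) (st : List (Int × Int))
    (m : Int) : Int :=
  st.foldl (fun a p => max a (p.2 + pvTd cycle bff_to_ids p.1)) m

def pvPot (cycle : List Int) (bff_to_ids : List (Int × List Int)) (st : List (Int × Int)) : Nat :=
  (st.map (fun p =>
    ((bff_to_ids.map (fun q => q.2.length)).sum + 2) ^ pvRk cycle bff_to_ids p.1)).sum

theorem pvLookup_len_le (bff_to_ids : List (Int × List Int)) (n : Int) (l : List Int)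
    (h : List.lookup n bff_to_ids = some l) :
    l.length ≤ (bff_to_ids.map (fun q => q.2.length)).sum := by
  induction bff_to_ids with
  | nil => simp [List.lookup] at h
  | cons p rest ih =>
      simp only [List.lookup] at h
      cases hk : n == p.1
      · rw [hk] at h
        have := ih h
        simp; omega
      · rw [hk] at h
        simp only [Option.some.injEq] at h
        subst h; simp

theorem pvCNC_len_le (cycle : List Int) (bff_to_ids : List (Int × List Int)) (n : Int) :
    (pvCNC cycle bff_to_ids n).length ≤ (bff_to_ids.map (fun q => q.2.length)).sum := by
  unfold pvCNC
  cases h : List.lookup n bff_to_ids with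
  | none => simp
  | some l =>
      calc (l.filter (fun c => !cycle.contains c)).length ≤ l.length := List.length_filter_le _ _
      _ ≤ _ := pvLookup_len_le _ _ _ h

theorem pvLoopA_eq_SM {cycle : List Int} {bff_to_ids : List (Int × List Int)}
    (hE : pvFrontier cycle bff_to_ids (bff_to_ids.length + 1) = []) :
    ∀ f st m, (∀ p ∈ st, pvReach cycle bff_to_ids p.1) →
      pvPot cycle bff_to_ids st ≤ f →
      pvLoopA cycle bff_to_ids f st m = pvSM cycle bff_to_ids st m := by
  intro f
  induction f with
  | zero =>
      intro st m hreach hpot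
      cases st with
      | nil => rfl
      | cons p rest =>
          exfalso
          have h2 : 2 ≤ (bff_to_ids.map (fun q => q.2.length)).sum + 2 := by omega
          have := Nat.one_le_two_pow (n := pvRk cycle bff_to_ids p.1)
          have hle : (2:Nat) ^ pvRk cycle bff_to_ids p.1
              ≤ ((bff_to_ids.map (fun q => q.2.length)).sum + 2) ^ pvRk cycle bff_to_ids p.1 :=
            Nat.pow_le_pow_left h2 _
          simp only [pvPot, List.map_cons, List.sum_cons] at hpot
          omega
  | succ f ih =>
      intro st m hreach hpot
      cases st with
      | nil => rfl
      | cons p rest =>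
          obtain ⟨lk, sl⟩ := p
          have hlk : pvReach cycle bff_to_ids lk := hreach _ (List.mem_cons_self ..)
          simp only [pvLoopA]
          rw [pvFoldPush]
          have hfilter : ((List.lookup lk bff_to_ids).getD []).filter
              (fun c => !cycle.contains c) = pvCNC cycle bff_to_ids lk := rfl
          rw [hfilter]
          have h1rk : 1 ≤ pvRk cycle bff_to_ids lk :=
            pvRk_pos (cycle := cycle) (bff_to_ids := bff_to_ids) (n := lk)
          have hX1 : 1 ≤ ((bff_to_ids.map (fun q => q.2.length)).sum + 2)
              ^ (pvRk cycle bff_to_ids lk - 1) := Nat.one_le_pow _ _ (by omega)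
          have hsum : ((pvCNC cycle bff_to_ids lk).map
                (fun c => ((bff_to_ids.map (fun q => q.2.length)).sum + 2)
                  ^ pvRk cycle bff_to_ids c)).sum
              ≤ (bff_to_ids.map (fun q => q.2.length)).sum
                * ((bff_to_ids.map (fun q => q.2.length)).sum + 2)
                  ^ (pvRk cycle bff_to_ids lk - 1) := by
            have hbound : ∀ x ∈ (pvCNC cycle bff_to_ids lk).map
                (fun c => ((bff_to_ids.map (fun q => q.2.length)).sum + 2)
                  ^ pvRk cycle bff_to_ids c),
                x ≤ ((bff_to_ids.map (fun q => q.2.length)).sum + 2)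
                  ^ (pvRk cycle bff_to_ids lk - 1) := by
              intro x hx
              obtain ⟨c, hc, rfl⟩ := List.mem_map.mp hx
              obtain ⟨_, hlt⟩ := pvChild_reach hE hlk hc
              exact Nat.pow_le_pow_right (by omega) (by omega)
            calc ((pvCNC cycle bff_to_ids lk).map
                (fun c => ((bff_to_ids.map (fun q => q.2.length)).sum + 2)
                  ^ pvRk cycle bff_to_ids c)).sum
                ≤ ((pvCNC cycle bff_to_ids lk).map
                    (fun c => ((bff_to_ids.map (fun q => q.2.length)).sum + 2)
                      ^ pvRk cycle bff_to_ids c)).length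
                  • ((bff_to_ids.map (fun q => q.2.length)).sum + 2)
                      ^ (pvRk cycle bff_to_ids lk - 1) :=
                  List.sum_le_card_nsmul _ _ hbound
              _ = ((pvCNC cycle bff_to_ids lk).length)
                  * ((bff_to_ids.map (fun q => q.2.length)).sum + 2)
                      ^ (pvRk cycle bff_to_ids lk - 1) := by
                  simp [smul_eq_mul]
              _ ≤ (bff_to_ids.map (fun q => q.2.length)).sum
                  * ((bff_to_ids.map (fun q => q.2.length)).sum + 2)
                      ^ (pvRk cycle bff_to_ids lk - 1) :=
                  Nat.mul_le_mul_right _ (pvCNC_len_le _ _ _)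
          have hpow : ((bff_to_ids.map (fun q => q.2.length)).sum + 2)
                ^ pvRk cycle bff_to_ids lk
              = ((bff_to_ids.map (fun q => q.2.length)).sum + 2)
                * ((bff_to_ids.map (fun q => q.2.length)).sum + 2)
                  ^ (pvRk cycle bff_to_ids lk - 1) := by
            conv_lhs => rw [show pvRk cycle bff_to_ids lk
              = (pvRk cycle bff_to_ids lk - 1) + 1 by omega]
            rw [pow_succ]; ring
          have hcomp : (pvCNC cycle bff_to_ids lk).map
                ((fun p : Int × Int => ((bff_to_ids.map (fun q => q.2.length)).sum + 2)
                  ^ pvRk cycle bff_to_ids p.1) ∘ (fun c => (c, sl + 1)))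
              = (pvCNC cycle bff_to_ids lk).map
                (fun c => ((bff_to_ids.map (fun q => q.2.length)).sum + 2)
                  ^ pvRk cycle bff_to_ids c) := by
            simp [Function.comp]
          have hpot' : pvPot cycle bff_to_ids
              ((((pvCNC cycle bff_to_ids lk).map (fun c => (c, sl + 1))).reverse) ++ rest) ≤ f := by
            simp only [pvPot, List.map_append, List.sum_append, List.map_reverse,
              List.sum_reverse, List.map_map, hcomp]
            simp only [pvPot, List.map_cons, List.sum_cons] at hpot
            have hdist : ((bff_to_ids.map (fun q => q.2.length)).sum + 2)
                  * ((bff_to_ids.map (fun q => q.2.length)).sum + 2)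
                    ^ (pvRk cycle bff_to_ids lk - 1)
                = (bff_to_ids.map (fun q => q.2.length)).sum
                  * ((bff_to_ids.map (fun q => q.2.length)).sum + 2)
                    ^ (pvRk cycle bff_to_ids lk - 1)
                  + 2 * ((bff_to_ids.map (fun q => q.2.length)).sum + 2)
                    ^ (pvRk cycle bff_to_ids lk - 1) := by ring
            omega
          have hreach' : ∀ p ∈ (((pvCNC cycle bff_to_ids lk).map
              (fun c => (c, sl + 1))).reverse) ++ rest, pvReach cycle bff_to_ids p.1 := by
            intro q hq
            rcases List.mem_append.mp hq with hq | hq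
            · rw [List.mem_reverse] at hq
              obtain ⟨c, hc, rfl⟩ := List.mem_map.mp hq
              exact (pvChild_reach hE hlk hc).1
            · exact hreach _ (List.mem_cons_of_mem _ hq)
          rw [ih _ _ hreach' hpot']
          have hm : (if sl > m then sl else m) = max m sl := by
            rcases lt_or_ge m sl with h | h
            · rw [if_pos h]; omega
            · rw [if_neg (by omega)]; omega
          rw [hm]
          unfold pvSM
          rw [List.foldl_append]
          haveI : RightCommutative
              (fun (a : Int) (p : Int × Int) => max a (p.2 + pvTd cycle bff_to_ids p.1)) :=
            ⟨fun p q a => by omega⟩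
          rw [(List.reverse_perm ((pvCNC cycle bff_to_ids lk).map
            (fun c => (c, sl + 1)))).foldl_eq (max m sl)]
          rw [List.foldl_map]
          simp only [List.foldl_cons]
          congr 1
          -- fold over children from (max m sl) equals max m (sl + td lk)
          rw [PySem.List.foldl_congr_mem (pvCNC cycle bff_to_ids lk) _
            (fun a c => max a (sl + (1 + pvTd cycle bff_to_ids c))) (max m sl)
            (fun acc x _ => by dsimp only; ring_nf)]
          rw [pvFoldMax_init (fun c => sl + (1 + pvTd cycle bff_to_ids c))
            (pvCNC cycle bff_to_ids lk) m sl]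
          congr 1
          rw [pvTd_unfold hE hlk,
            pvFoldMax_add (fun c => 1 + pvTd cycle bff_to_ids c)
              (pvCNC cycle bff_to_ids lk) sl 0, add_zero]

theorem pvA_kid {cycle : List Int} {bff_to_ids : List (Int × List Int)}
    (hE : pvFrontier cycle bff_to_ids (bff_to_ids.length + 1) = []) {kid : Int}
    (hkid : kid ∈ cycle) :
    pvLoopA cycle bff_to_ids
      (((bff_to_ids.map (fun p => p.2.length)).sum + 2) ^ (bff_to_ids.length + 1))
      [(kid, 0)] 0 = pvTd cycle bff_to_ids kid := by
  have hreach : pvReach cycle bff_to_ids kid := ⟨0, Nat.zero_le _, hkid⟩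
  have hpot : pvPot cycle bff_to_ids [(kid, 0)]
      ≤ ((bff_to_ids.map (fun p => p.2.length)).sum + 2) ^ (bff_to_ids.length + 1) := by
    simp only [pvPot, List.map_cons, List.map_nil, List.sum_cons, List.sum_nil, Nat.add_zero]
    exact Nat.pow_le_pow_right (by omega) pvRk_le
  rw [pvLoopA_eq_SM hE _ _ _ (by rintro p hp; rw [List.mem_singleton] at hp; subst hp; exact hreach) hpot]
  simp only [pvSM, List.foldl_cons, List.foldl_nil, zero_add]
  have := pvTd_nonneg cycle bff_to_ids kid
  omega

-- ---- B-side: level loop computes the max depth over the level ----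
def pvMD (cycle : List Int) (bff_to_ids : List (Int × List Int)) (lvl : List Int) : Int :=
  lvl.foldl (fun a n => max a (pvTd cycle bff_to_ids n)) 0

theorem pvLevelLoop_eq {cycle : List Int} {bff_to_ids : List (Int × List Int)}
    (hE : pvFrontier cycle bff_to_ids (bff_to_ids.length + 1) = []) :
    ∀ (f : Nat) (lvl : List Int) (dep : Int), (∀ n ∈ lvl, pvReach cycle bff_to_ids n) →
      pvMD cycle bff_to_ids lvl + 1 ≤ (f : Int) →
      pvLevelLoop cycle bff_to_ids f lvl dep = dep + pvMD cycle bff_to_ids lvl := by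
  intro f
  induction f with
  | zero =>
      intro lvl dep _ hf
      have : (0:Int) ≤ pvMD cycle bff_to_ids lvl := pvFoldMax_ge_init _ _ _
      omega
  | succ f ih =>
      intro lvl dep hreach hf
      simp only [pvLevelLoop]
      have hnxt : lvl.flatMap (fun n => ((List.lookup n bff_to_ids).getD []).filter
          (fun c => !cycle.contains c)) = lvl.flatMap (pvCNC cycle bff_to_ids) := rfl
      rw [hnxt]
      by_cases hemp : (lvl.flatMap (pvCNC cycle bff_to_ids)).isEmpty
      · rw [if_pos hemp]
        have hnil : ∀ n ∈ lvl, pvCNC cycle bff_to_ids n = [] :=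
          List.flatMap_eq_nil_iff.mp (List.isEmpty_iff.mp hemp)
        have hmd : pvMD cycle bff_to_ids lvl = 0 := by
          have hle : pvMD cycle bff_to_ids lvl ≤ 0 := by
            apply pvFoldMax_le
            · intro n hn
              rw [pvTd_unfold hE (hreach n hn), hnil n hn]
              rfl
            · exact le_refl 0
          have hge : (0:Int) ≤ pvMD cycle bff_to_ids lvl := pvFoldMax_ge_init _ _ _
          omega
        rw [hmd]; omega
      · rw [if_neg hemp]
        have hne : lvl.flatMap (pvCNC cycle bff_to_ids) ≠ [] := by
          intro h; rw [h] at hemp; simp at hemp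
        have hreach' : ∀ c ∈ lvl.flatMap (pvCNC cycle bff_to_ids),
            pvReach cycle bff_to_ids c := by
          intro c hc
          obtain ⟨n, hn, hcn⟩ := List.mem_flatMap.mp hc
          exact (pvChild_reach hE (hreach n hn) hcn).1
        -- MD lvl = 1 + MD nxt
        have hkey : pvMD cycle bff_to_ids lvl
            = 1 + pvMD cycle bff_to_ids (lvl.flatMap (pvCNC cycle bff_to_ids)) := by
          have h1 : 1 + pvMD cycle bff_to_ids (lvl.flatMap (pvCNC cycle bff_to_ids))
              = (lvl.flatMap (pvCNC cycle bff_to_ids)).foldl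
                (fun a c => max a (1 + pvTd cycle bff_to_ids c)) 1 := by
            unfold pvMD
            rw [pvFoldMax_add (pvTd cycle bff_to_ids) _ 1 0]
            norm_num
          rw [h1, List.foldl_flatMap]
          -- nested fold = fold of max over td, maintained with 0 ≤ acc
          have hnest : ∀ (L : List Int) (a : Int), 0 ≤ a →
              (∀ n ∈ L, pvReach cycle bff_to_ids n) →
              L.foldl (fun acc n => (pvCNC cycle bff_to_ids n).foldl
                  (fun acc c => max acc (1 + pvTd cycle bff_to_ids c)) acc) a
                = L.foldl (fun acc n => max acc (pvTd cycle bff_to_ids n)) a := by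
            intro L
            induction L with
            | nil => intro a _ _; rfl
            | cons n L ihL =>
                intro a ha hr
                simp only [List.foldl_cons]
                have hstep : (pvCNC cycle bff_to_ids n).foldl
                    (fun acc c => max acc (1 + pvTd cycle bff_to_ids c)) a
                    = max a (pvTd cycle bff_to_ids n) := by
                  have ha0 : a = max a 0 := by omega
                  conv_lhs => rw [ha0]
                  rw [pvFoldMax_init (fun c => 1 + pvTd cycle bff_to_ids c),
                    ← pvTd_unfold hE (hr n (List.mem_cons_self ..))]
                rw [hstep, ihL (max a (pvTd cycle bff_to_ids n)) (by omega)
                  (fun x hx => hr x (List.mem_cons_of_mem _ hx))]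
          rw [hnest lvl 1 (by omega) hreach]
          have hmax : lvl.foldl (fun acc n => max acc (pvTd cycle bff_to_ids n)) 1
              = max 1 (lvl.foldl (fun acc n => max acc (pvTd cycle bff_to_ids n)) 0) := by
            have h10 : (1:Int) = max 1 0 := by omega
            conv_lhs => rw [h10]
            exact pvFoldMax_init (pvTd cycle bff_to_ids) lvl 1 0
          rw [hmax]
          -- max 1 (MD lvl) = MD lvl since some node has a child
          obtain ⟨c, hc⟩ := List.exists_mem_of_ne_nil _ hne
          obtain ⟨n, hn, hcn⟩ := List.mem_flatMap.mp hc
          have htdn : 1 ≤ pvTd cycle bff_to_ids n := by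
            rw [pvTd_unfold hE (hreach n hn)]
            have h2 : (1 + pvTd cycle bff_to_ids c) ≤ (pvCNC cycle bff_to_ids n).foldl
                (fun a c => max a (1 + pvTd cycle bff_to_ids c)) 0 :=
              pvFoldMax_ge_mem _ _ 0 c hcn
            have := pvTd_nonneg cycle bff_to_ids c
            omega
          have hmd := pvFoldMax_ge_mem (pvTd cycle bff_to_ids) lvl 0 n hn
          unfold pvMD
          omega
        rw [ih _ _ hreach' (by omega), hkey]; omega

theorem pvB_kid {cycle : List Int} {bff_to_ids : List (Int × List Int)}
    (hE : pvFrontier cycle bff_to_ids (bff_to_ids.length + 1) = []) {kid : Int}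
    (hkid : kid ∈ cycle) :
    pvLevelLoop cycle bff_to_ids (bff_to_ids.length + 1) [kid] 0
      = pvTd cycle bff_to_ids kid := by
  have hreach : pvReach cycle bff_to_ids kid := ⟨0, Nat.zero_le _, hkid⟩
  have hmd : pvMD cycle bff_to_ids [kid] = pvTd cycle bff_to_ids kid := by
    simp only [pvMD, List.foldl_cons, List.foldl_nil]
    have := pvTd_nonneg cycle bff_to_ids kid
    omega
  have htd := pvTd_le_rk hE (pvRk cycle bff_to_ids kid) kid hreach le_rfl
  have hrk : pvRk cycle bff_to_ids kid ≤ bff_to_ids.length + 1 := pvRk_le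
  rw [pvLevelLoop_eq hE _ _ _ (by rintro n hn; rw [List.mem_singleton] at hn; subst hn; exact hreach)
    (by rw [hmd]; push_cast; omega)]
  rw [hmd]; omega

-- ===== VERDICT (by name: the statement is the Claim_ definition above) =====
theorem get_chain_len_spec : Claim_equal_get_chain_len := by
  intro cycle bff_to_ids _ hpre
  obtain ⟨_, hE⟩ := hpre
  unfold Spec_get_chain_len get_chain_len get_chain_len_alt
  simp only []
  apply PySem.List.foldl_congr_mem
  intro acc kid hkid
  rw [pvA_kid hE hkid, pvB_kid hE hkid]
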